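-- pv_equiv track=rewrite | github.com/sbackmann/openresult-games | src/moralsim/analysis/utils.py | _replace_model_name
-- ===== SOURCE A (Python) =====
-- def _replace_model_name(name:str) -> str:
--     models_replace = {
--         "gemini": "\gemini",
--         "deepseek-v3": "\dsv",
--         "deepseek-r1": "\dsr",
--         "gpt-4o-mini": "\gptfouromini",
--         "gpt-4o": "\gptfouro",
--         "o3-mini": "\othreemini",
--         "llama": "\llama",
--         "qwen": "\qwen",
--         "claude": "\claude",
--     }
--     sorted_items = sorted(models_replace.items(), key=lambda kv: -len(kv[0]))
--     for key, macro in sorted_items: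
--         if key in name.lower():
--             return macro
--     return name
-- ===== SOURCE B (Python) =====
-- def _replace_model_name(name: str) -> str:
--     models_replace = {
--         "gemini": "\gemini",
--         "deepseek-v3": "\dsv",
--         "deepseek-r1": "\dsr",
--         "gpt-4o-mini": "\gptfouromini",
--         "gpt-4o": "\gptfouro",
--         "o3-mini": "\othreemini",
--         "llama": "\llama",
--         "qwen": "\qwen",
--         "claude": "\claude",
--     }
--     low = name.lower()
--     best_len = -1
--     best_macro = name
--     for key, macro in models_replace.items():
--         if key in low and len(key) > best_len:
--             best_len = len(key)
--             best_macro = macro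
--     return best_macro
-- ===== Notes on version B (the rewrite author's own statement) =====
-- stated objective: simpler
-- what changed: Replaces sort-then-first-match with a single pass over the dict in insertion order keeping the longest matching key so far (strict > keeps insertion-order ties), no sorting and no early return.
import Mathlib
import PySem

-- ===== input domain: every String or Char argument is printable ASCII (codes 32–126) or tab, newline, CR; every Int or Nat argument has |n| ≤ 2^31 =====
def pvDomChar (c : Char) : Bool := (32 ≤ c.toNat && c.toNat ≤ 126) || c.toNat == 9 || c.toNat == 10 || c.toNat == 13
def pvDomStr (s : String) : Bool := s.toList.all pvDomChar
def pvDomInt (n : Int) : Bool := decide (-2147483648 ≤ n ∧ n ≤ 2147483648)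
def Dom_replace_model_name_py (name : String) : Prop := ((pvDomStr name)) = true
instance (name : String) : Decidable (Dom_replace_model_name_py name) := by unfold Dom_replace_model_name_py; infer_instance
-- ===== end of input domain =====

-- B replaces A's sort-then-first-match by a single insertion-order pass keeping the longest match (simpler; return values proved equal).

-- ===== PORT A =====
-- the dict literal's items, in insertion order
def pvModels : List (String × String) :=
  [("gemini", "\\gemini"), ("deepseek-v3", "\\dsv"), ("deepseek-r1", "\\dsr"),
   ("gpt-4o-mini", "\\gptfouromini"), ("gpt-4o", "\\gptfouro"), ("o3-mini", "\\othreemini"),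
   ("llama", "\\llama"), ("qwen", "\\qwen"), ("claude", "\\claude")]

-- the 'for key, macro in sorted_items: if key in name.lower(): return macro' loop
def pvLoopA (name : String) : List (String × String) → String
  | [] => name
  | (key, mac) :: rest =>
      if PySem.Str.isIn key (PySem.Str.lower name) then mac else pvLoopA name rest

def replace_model_name_py (name : String) : String :=
  pvLoopA name (PySem.List.sorted pvModels (fun kv => -(PySem.Str.len kv.1 : Int)) false)

-- ===== PORT B =====
-- single pass in insertion order, keeping (best_len, best_macro); strict > resolves ties to the earlier key
def pvLoopB (low : String) : List (String × String) → Int → String → String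
  | [], _, bestMacro => bestMacro
  | (key, mac) :: rest, bestLen, bestMacro =>
      if PySem.Str.isIn key low ∧ (PySem.Str.len key : Int) > bestLen then
        pvLoopB low rest (PySem.Str.len key) mac
      else
        pvLoopB low rest bestLen bestMacro

def replace_model_name_py_alt (name : String) : String :=
  pvLoopB (PySem.Str.lower name) pvModels (-1) name

-- ===== PRECONDITION & SPEC =====
def Spec_replace_model_name_py (name : String) (out : String) : Prop := out = replace_model_name_py_alt name
instance (name : String) (out : String) : Decidable (Spec_replace_model_name_py name out) := by unfold Spec_replace_model_name_py; infer_instance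

-- ===== CLAIM (what is proved, stated in full; the proofs are below) =====
def Claim_equal_replace_model_name_py : Prop := ∀ (name : String), Dom_replace_model_name_py name → Spec_replace_model_name_py name (replace_model_name_py name)

-- ===== LEMMAS AND PROOFS =====
-- the stable descending-by-length sort of the literal list, evaluated once
set_option maxHeartbeats 4000000 in
theorem pvSorted_eval :
    PySem.List.sorted pvModels (fun kv => -(PySem.Str.len kv.1 : Int)) false =
      [("deepseek-v3", "\\dsv"), ("deepseek-r1", "\\dsr"), ("gpt-4o-mini", "\\gptfouromini"),
       ("o3-mini", "\\othreemini"), ("gemini", "\\gemini"), ("gpt-4o", "\\gptfouro"),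
       ("claude", "\\claude"), ("llama", "\\llama"), ("qwen", "\\qwen")] := by
  rfl

-- ===== VERDICT (by name: the statement is the Claim_ definition above) =====
set_option maxHeartbeats 8000000 in
theorem replace_model_name_py_spec : Claim_equal_replace_model_name_py := by
  intro name _
  show replace_model_name_py name = replace_model_name_py_alt name
  unfold replace_model_name_py replace_model_name_py_alt
  rw [pvSorted_eval]
  cases h1 : PySem.Str.isIn "gemini" (PySem.Str.lower name) <;>
  cases h2 : PySem.Str.isIn "deepseek-v3" (PySem.Str.lower name) <;>
  cases h3 : PySem.Str.isIn "deepseek-r1" (PySem.Str.lower name) <;>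
  cases h4 : PySem.Str.isIn "gpt-4o-mini" (PySem.Str.lower name) <;>
  cases h5 : PySem.Str.isIn "gpt-4o" (PySem.Str.lower name) <;>
  cases h6 : PySem.Str.isIn "o3-mini" (PySem.Str.lower name) <;>
  cases h7 : PySem.Str.isIn "llama" (PySem.Str.lower name) <;>
  cases h8 : PySem.Str.isIn "qwen" (PySem.Str.lower name) <;>
  cases h9 : PySem.Str.isIn "claude" (PySem.Str.lower name) <;>
  simp_all [pvLoopA, pvLoopB, pvModels]
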